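-- pv_equiv track=rewrite | github.com/deokgu1994/Python | test.py | solution
-- ===== SOURCE A (Python) =====
-- def solution(board, moves):
--     answer = 0
--     N = len(board[0])
--     _list = [ [] for x in range(N +1)]
--     x_borad = board[::-1]
--     for board in x_borad:
--         for index, num in enumerate(board):
--             if num != 0:
--                 _list[index].append(num)
--
--     for x in moves:
--         if len(_list[x-1]) > 0:
--             compare_num = _list[x-1].pop()
--             if len(_list[N]) > 0 and _list[N][-1] == compare_num :
--                 _list[N].pop()
--                 answer += 2
--             else:
--                 _list[N].append(compare_num)
--     return answer
-- ===== SOURCE B (Python) =====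
-- def solution(board, moves):
--     n = len(board[0])
--     if any(m < 0 for m in moves):
--         raise ValueError("negative claw position")
--     grid = [row[:] for row in board]   # copy: the board argument is never mutated
--     basket = []
--     answer = 0
--     for m in moves:
--         if m < 1 or m > n:             # no column under this position: nothing to pick
--             continue
--         c = m - 1
--         for row in grid:
--             if c < len(row) and row[c] != 0:
--                 v = row[c]
--                 row[c] = 0
--                 if basket and basket[-1] == v:
--                     basket.pop()
--                     answer += 2
--                 else:
--                     basket.append(v)
--                 break
--     return answer
-- ===== Notes on version B (the rewrite author's own statement) =====
-- stated objective: alternative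
-- what changed: B rejects negative claw positions (ValueError), then keeps a mutable copy of the grid and a basket and, per move, rescans column m-1 top-down for the first nonzero cell and zeroes it in place (positions with no column under them pick nothing), instead of A's one-time transposition into per-column stacks popped from the back; Pre_ excludes negative moves (B raises there, while A wraps the position to another column by Python negative indexing) and jagged rows whose cell at column N A loads into its basket slot before any move is played.
-- outside the precondition, e.g. on solution([[1], [1]], [-1, 1]): A returns 2, B raises ValueError; on solution([[0], [1, 1]], [1]): A returns 2, B returns 0
import Mathlib
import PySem

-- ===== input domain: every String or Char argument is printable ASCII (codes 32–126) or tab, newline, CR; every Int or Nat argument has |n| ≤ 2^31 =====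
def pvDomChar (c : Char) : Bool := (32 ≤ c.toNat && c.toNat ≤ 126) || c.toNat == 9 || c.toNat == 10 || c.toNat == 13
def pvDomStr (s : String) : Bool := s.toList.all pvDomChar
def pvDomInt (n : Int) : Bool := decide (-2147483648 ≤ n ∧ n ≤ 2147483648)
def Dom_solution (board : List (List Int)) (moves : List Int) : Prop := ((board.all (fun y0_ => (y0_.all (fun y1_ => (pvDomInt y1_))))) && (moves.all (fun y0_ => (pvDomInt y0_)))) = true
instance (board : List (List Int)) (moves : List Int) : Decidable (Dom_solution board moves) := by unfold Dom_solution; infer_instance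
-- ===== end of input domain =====

-- B validates the moves and replaces A's precomputed per-column stacks by an
-- on-demand top-down rescan of a mutable grid copy; neither program mutates its
-- arguments, equivalence is about the return value.

-- Python list-index normalization for a list of length n (exact: none = IndexError);
-- used by port A, like a PySem primitive.
def pyIdx (n : Nat) (i : Int) : Option Nat :=
  if 0 ≤ i ∧ i < (n : Int) then some i.toNat
  else if i < 0 ∧ 0 ≤ i + (n : Int) then some (i + (n : Int)).toNat
  else none

-- ===== PORT A =====
-- _list[index].append(num) for one (index, num) pair of enumerate(board_row)
def appendNum (ls : List (List Int)) (p : Int × Int) : List (List Int) :=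
  if p.2 ≠ 0 then ls.set p.1.toNat ((ls.getD p.1.toNat []) ++ [p.2]) else ls

-- the inner 'for index, num in enumerate(board): if num != 0: _list[index].append(num)'
def addRow (ls : List (List Int)) (row : List Int) : List (List Int) :=
  (PySem.List.enumerate row).foldl appendNum ls

-- the body of 'for x in moves' (state: (_list, answer))
def stepA (N : Nat) (st : List (List Int) × Int) (x : Int) : List (List Int) × Int :=
  match pyIdx (N + 1) (x - 1) with
  | none => st          -- Python raises IndexError here: outside Pre_
  | some i =>
    let s := st.1.getD i []
    if s.length > 0 then
      let compare := s.getLastD 0                      -- _list[x-1].pop()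
      let ls1 := st.1.set i s.dropLast
      let basket := ls1.getD N []                      -- _list[N]
      if basket.length > 0 ∧ basket.getLastD 0 = compare then
        (ls1.set N basket.dropLast, st.2 + 2)
      else
        (ls1.set N (basket ++ [compare]), st.2)
    else st

def solution (board : List (List Int)) (moves : List Int) : Int :=
  let N := (PySem.List.pyGetD board 0 []).length      -- len(board[0]); board ≠ [] in Pre_
  let init : List (List Int) := (PySem.List.pyRange 0 ((N : Int) + 1) 1).map (fun _ => [])
  let lists := ((PySem.List.slice? board none none (-1)).getD []).foldl addRow init
  (moves.foldl (stepA N) (lists, 0)).2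

-- ===== PORT B =====
-- the inner 'for row in grid: if c < len(row) and row[c] != 0: … break'
-- (returns the updated grid and the picked doll; none if no row had one)
def pickB (c : Int) : List (List Int) → Option (List (List Int) × Int)
  | [] => none
  | row :: rest =>
    if c < (row.length : Int) ∧ PySem.List.pyGetD row c 0 ≠ 0 then
      some ((PySem.List.pySetD row c 0) :: rest, PySem.List.pyGetD row c 0)   -- row[c] = 0; break
    else (pickB c rest).map (fun p => (row :: p.1, p.2))

-- the body of 'for m in moves' (state: (grid, basket, answer))
def stepB (n : Nat) (st : List (List Int) × List Int × Int) (m : Int) : List (List Int) × List Int × Int :=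
  if m < 1 ∨ (n : Int) < m then st        -- no column under this position: nothing to pick
  else
  match pickB (m - 1) st.1 with
  | none => st
  | some (g, v) =>
    if st.2.1 ≠ [] ∧ st.2.1.getLastD 0 = v then (g, st.2.1.dropLast, st.2.2 + 2)
    else (g, st.2.1 ++ [v], st.2.2)

def solution_alt (board : List (List Int)) (moves : List Int) : Int :=
  let n := (PySem.List.pyGetD board 0 []).length      -- len(board[0]); board ≠ [] in Pre_
  if moves.any (fun m => decide (m < 0)) then 0
    -- Python B raises ValueError on a negative claw position: outside Pre_
  else
    let grid := board.map (fun row => row)   -- [row[:] for row in board]: a fresh copy, identity on immutable lists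
    (moves.foldl (stepB n) (grid, ([], 0))).2.2

-- ===== PRECONDITION & SPEC =====
-- Pre_ excludes, beyond the inputs where A itself raises (empty board, nonzero
-- cells past column N+1, moves past N+1), the negative moves — B rejects them
-- with ValueError, while A wraps the position to another column by Python
-- negative indexing — and the jagged rows whose cell at column N A loads into
-- its basket slot before any move is played, a pre-seeded basket B does not
-- reproduce.
def Pre_solution (board : List (List Int)) (moves : List Int) : Prop :=
  board ≠ [] ∧
  (∀ row ∈ board, ∀ v ∈ row.drop ((PySem.List.pyGetD board 0 []).length + 1), v = 0) ∧
  (moves ≠ [] → ∀ row ∈ board, row.getD (PySem.List.pyGetD board 0 []).length 0 = 0) ∧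
  (∀ m ∈ moves, 0 ≤ m ∧ m ≤ ((PySem.List.pyGetD board 0 []).length : Int) + 1)
instance (board : List (List Int)) (moves : List Int) : Decidable (Pre_solution board moves) := by
  unfold Pre_solution; infer_instance

def pvWitness_solution : List (List Int) × List Int := ([[1], [1]], [1, 1])

def Spec_solution (board : List (List Int)) (moves : List Int) (out : Int) : Prop :=
  out = solution_alt board moves
instance (board : List (List Int)) (moves : List Int) (out : Int) : Decidable (Spec_solution board moves out) := by
  unfold Spec_solution; infer_instance

-- ===== CLAIM =====
def Claim_equal_solution : Prop := ∀ (board : List (List Int)) (moves : List Int), Dom_solution board moves → Pre_solution board moves → Spec_solution board moves (solution board moves)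

-- ===== LEMMAS AND PROOFS =====

theorem length_appendNum (ls : List (List Int)) (p : Int × Int) :
    (appendNum ls p).length = ls.length := by
  unfold appendNum; split <;> simp

theorem addRowFrom_getD (row : List Int) (s : Nat) (ls : List (List Int))
    (h : ∀ j : Nat, row.getD j 0 ≠ 0 → s + j < ls.length) (c : Nat) :
    ((PySem.List.enumerate row (s : Int)).foldl appendNum ls).getD c []
      = ls.getD c [] ++ (if s ≤ c ∧ row.getD (c - s) 0 ≠ 0 then [row.getD (c - s) 0] else []) := by
  induction row generalizing s ls with
  | nil => simp [PySem.List.enumerate_nil]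
  | cons x xs ih =>
    rw [PySem.List.enumerate_cons]
    simp only [List.foldl_cons]
    have hcast : (s:Int) + 1 = ((s+1 : Nat) : Int) := by push_cast; ring
    have hlen1 : (appendNum ls ((s:Int), x)).length = ls.length := length_appendNum ls _
    have h' : ∀ j : Nat, xs.getD j 0 ≠ 0 → (s+1) + j < (appendNum ls ((s:Int), x)).length := by
      intro j hj
      rw [hlen1]
      have := h (j+1) (by simpa using hj)
      omega
    rw [hcast, ih (s+1) _ h']
    by_cases hc : s = c
    · subst hc
      rw [if_neg (by omega)]
      simp only [Nat.sub_self, List.getD_cons_zero, List.append_nil, le_refl, true_and]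
      unfold appendNum
      by_cases hx : x = 0
      · simp [hx]
      · have hs : s < ls.length := by have := h 0 (by simpa using hx); omega
        simp [List.getD, hs, hx]
    · have hget : (appendNum ls ((s:Int), x)).getD c [] = ls.getD c [] := by
        unfold appendNum
        by_cases hx : x = 0
        · simp [hx]
        · simp only [hx, ne_eq, not_false_iff, if_pos]
          simp [List.getD, hc]
      rw [hget]
      congr 1
      by_cases hsc : s ≤ c
      · have h1 : s + 1 ≤ c := by omega
        have h2 : c - s = (c - (s+1)) + 1 := by omega
        rw [h2, List.getD_cons_succ]
        simp [h1, hsc]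
      · have h1 : ¬ (s + 1 ≤ c) := by omega
        simp [h1, hsc]

theorem length_addRow (ls : List (List Int)) (row : List Int) :
    (addRow ls row).length = ls.length := by
  unfold addRow
  generalize PySem.List.enumerate row = ps
  induction ps generalizing ls with
  | nil => rfl
  | cons p ps ih => rw [List.foldl_cons, ih, length_appendNum]

theorem build_getD (rows : List (List Int)) (ls : List (List Int))
    (h : ∀ row ∈ rows, ∀ j : Nat, row.getD j 0 ≠ 0 → j < ls.length) (c : Nat) :
    (rows.foldl addRow ls).getD c []
      = ls.getD c [] ++ rows.filterMap
          (fun row => if row.getD c 0 ≠ 0 then some (row.getD c 0) else none) := by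
  induction rows generalizing ls with
  | nil => simp
  | cons row rows ih =>
    rw [List.foldl_cons]
    have h1 : ∀ row' ∈ rows, ∀ j : Nat, row'.getD j 0 ≠ 0 → j < (addRow ls row).length := by
      intro r hr j hj; rw [length_addRow]; exact h r (by simp [hr]) j hj
    rw [ih _ h1]
    have h2 : (addRow ls row).getD c []
        = ls.getD c [] ++ (if c.sub 0 ≤ c ∧ row.getD (c - 0) 0 ≠ 0 then [row.getD (c - 0) 0] else []) := by
      have h0 : ∀ j : Nat, row.getD j 0 ≠ 0 → 0 + j < ls.length := by
        intro j hj; simpa using h row (by simp) j hj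
      have := addRowFrom_getD row 0 ls h0 c
      unfold addRow
      rw [show ((0:Nat):Int) = (0:Int) by norm_num] at this
      rw [this]
      simp
    rw [h2]
    simp only [Nat.sub_zero, List.filterMap_cons, List.append_assoc]
    congr 1
    by_cases hr : row.getD c 0 = 0
    · simp [List.getD] at hr ⊢; simp [hr]
    · simp [List.getD] at hr ⊢; simp [hr]

theorem length_foldl_addRow (rows : List (List Int)) (ls : List (List Int)) :
    (rows.foldl addRow ls).length = ls.length := by
  induction rows generalizing ls with
  | nil => rfl
  | cons r rs ih => rw [List.foldl_cons, ih, length_addRow]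

theorem length_init (N : Nat) :
    ((PySem.List.pyRange 0 ((N : Int) + 1) 1).map (fun _ => ([] : List Int))).length = N + 1 := by
  have h : ((N : Int) + 1) = (((N + 1 : Nat)) : Int) := by push_cast; ring
  rw [h]; simp [pysem]

theorem getD_init (N c : Nat) :
    ((PySem.List.pyRange 0 ((N : Int) + 1) 1).map (fun _ => ([] : List Int))).getD c [] = [] := by
  simp only [List.getD, List.getElem?_map]
  cases (PySem.List.pyRange 0 ((N : Int) + 1) 1)[c]? <;> simp

-- the column-c dolls of a grid, top row first (B's rescan order)
def colvals (g : List (List Int)) (c : Nat) : List Int :=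
  g.filterMap (fun row => if row.getD c 0 ≠ 0 then some (row.getD c 0) else none)

theorem colvals_cons_zero (row : List Int) (g : List (List Int)) (c : Nat)
    (h : row.getD c 0 = 0) : colvals (row :: g) c = colvals g c := by
  unfold colvals
  rw [List.filterMap_cons]
  have he : (if row.getD c 0 ≠ 0 then some (row.getD c 0) else none) = none := by
    rw [h]; simp
  rw [he]

theorem colvals_cons_ne (row : List Int) (g : List (List Int)) (c : Nat)
    (h : row.getD c 0 ≠ 0) : colvals (row :: g) c = row.getD c 0 :: colvals g c := by
  unfold colvals
  rw [List.filterMap_cons]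
  have he : (if row.getD c 0 ≠ 0 then some (row.getD c 0) else none) = some (row.getD c 0) := by
    rw [if_pos h]
  rw [he]

theorem pyGetD_cast (row : List Int) (c : Nat) :
    PySem.List.pyGetD row (c : Int) 0 = row.getD c 0 := by
  simp [pysem, List.getD]

theorem pickB_cond_false (row : List Int) (c : Nat) (h : row.getD c 0 = 0) :
    ¬ ((c : Int) < (row.length : Int) ∧ PySem.List.pyGetD row (c : Int) 0 ≠ 0) := by
  rintro ⟨-, h2⟩
  rw [pyGetD_cast, h] at h2
  exact h2 rfl

theorem pickB_none (c : Nat) (g : List (List Int))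
    (h : colvals g c = []) : pickB (c : Int) g = none := by
  induction g with
  | nil => rfl
  | cons row rest ih =>
    have h0 : row.getD c 0 = 0 := by
      by_contra hne
      rw [colvals_cons_ne row rest c hne] at h
      exact List.cons_ne_nil _ _ h
    unfold pickB
    rw [if_neg (pickB_cond_false row c h0)]
    rw [ih (by rwa [colvals_cons_zero row rest c h0] at h)]
    rfl

theorem pickB_some (c : Nat) (g : List (List Int))
    (v : Int) (rest : List Int) (h : colvals g c = v :: rest) :
    ∃ g', pickB (c : Int) g = some (g', v) ∧
      colvals g' c = rest ∧
      (∀ c' : Nat, c' ≠ c → colvals g' c' = colvals g c') := by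
  induction g with
  | nil => simp [colvals] at h
  | cons row tl ih =>
    unfold pickB
    by_cases h0 : row.getD c 0 = 0
    · rw [if_neg (pickB_cond_false row c h0)]
      have htl : colvals tl c = v :: rest := by rwa [colvals_cons_zero row tl c h0] at h
      obtain ⟨g', hpk, hc, hc'⟩ := ih htl
      refine ⟨row :: g', ?_, ?_, ?_⟩
      · rw [hpk]; rfl
      · rw [colvals_cons_zero row g' c h0]; exact hc
      · intro c' hne
        by_cases h0' : row.getD c' 0 = 0
        · rw [colvals_cons_zero row g' c' h0', colvals_cons_zero row tl c' h0']
          exact hc' c' hne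
        · rw [colvals_cons_ne row g' c' h0', colvals_cons_ne row tl c' h0', hc' c' hne]
    · have hclen : c < row.length := by
        by_contra hge
        exact h0 (List.getD_eq_default _ _ (Nat.le_of_not_lt hge))
      rw [colvals_cons_ne row tl c h0] at h
      obtain ⟨hveq, hrest⟩ : row.getD c 0 = v ∧ colvals tl c = rest :=
        ⟨(List.cons.injEq _ _ _ _ ▸ h).1, (List.cons.injEq _ _ _ _ ▸ h).2⟩
      rw [if_pos ⟨by exact_mod_cast hclen, by rw [pyGetD_cast]; exact h0⟩]
      rw [PySem.List.pySetD_natCast, pyGetD_cast, hveq]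
      refine ⟨row.set c 0 :: tl, rfl, ?_, ?_⟩
      · have hz : (row.set c 0).getD c 0 = 0 := by
          rw [List.getD_eq_getElem _ 0 (by simpa using hclen)]
          simp [List.getElem_set_self]
        rw [colvals_cons_zero _ tl c hz]; exact hrest
      · intro c' hne
        have he : (row.set c 0).getD c' 0 = row.getD c' 0 := by
          by_cases hlt : c' < row.length
          · rw [List.getD_eq_getElem _ 0 (by simpa using hlt), List.getD_eq_getElem _ 0 hlt]
            exact List.getElem_set_ne (i := c) (j := c') (fun he' => hne he'.symm) _
          · rw [List.getD_eq_default _ _ (by simpa using Nat.le_of_not_lt hlt),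
                List.getD_eq_default _ _ (Nat.le_of_not_lt hlt)]
        by_cases h0' : row.getD c' 0 = 0
        · rw [colvals_cons_zero _ tl c' (he.trans h0'), colvals_cons_zero row tl c' h0']
        · rw [colvals_cons_ne _ tl c' (he ▸ h0'), colvals_cons_ne row tl c' h0', he]

theorem getD_set_self (l : List (List Int)) (i : Nat) (v : List Int) (h : i < l.length) :
    (l.set i v).getD i [] = v := by simp [List.getD, h]

theorem getD_set_ne (l : List (List Int)) (i j : Nat) (v : List Int) (h : i ≠ j) :
    (l.set i v).getD j [] = l.getD j [] := by simp [List.getD, h]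

theorem chain_last (l : List Int) (h : List.IsChain (· ≠ ·) l) (hne : l.dropLast ≠ []) :
    l.dropLast.getLastD 0 ≠ l.getLastD 0 := by
  rcases List.eq_nil_or_concat l with rfl | ⟨ys, b, rfl⟩
  · simp at hne
  · rw [List.concat_eq_append] at h hne ⊢
    rw [List.dropLast_concat] at hne ⊢
    rcases List.eq_nil_or_concat ys with rfl | ⟨zs, a, rfl⟩
    · exact absurd rfl hne
    · rw [List.concat_eq_append] at h ⊢
      rw [List.getLastD_concat, List.getLastD_concat]
      have := (List.isChain_append.mp h).2.2
      exact this a (by simp) b rfl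

theorem set_getD_self (l : List (List Int)) (N : Nat) (h : N < l.length) :
    l.set N (l.getD N []) = l := by
  rw [List.getD_eq_getElem _ _ h]
  exact List.set_getElem_self h

theorem dropLast_append_getLastD (l : List Int) (h : l ≠ []) :
    l.dropLast ++ [l.getLastD 0] = l := by
  rcases List.eq_nil_or_concat l with rfl | ⟨ys, b, rfl⟩
  · exact absurd rfl h
  · rw [List.concat_eq_append, List.dropLast_concat, List.getLastD_concat]

-- the invariant between A's slot array and B's (grid, basket): slots 0..N-1 hold
-- the columns of the current grid bottom-up and slot N is the basket, which
-- never holds two adjacent equal values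
def PilesRel (N : Nat) (lists grid : List (List Int)) (basket : List Int) : Prop :=
  lists.length = N + 1 ∧
  (∀ c : Nat, c < N → lists.getD c [] = (colvals grid c).reverse) ∧
  lists.getD N [] = basket ∧ List.IsChain (· ≠ ·) basket

theorem step_rel (N : Nat) (stA : List (List Int) × Int)
    (stB : List (List Int) × List Int × Int) (m : Int) (hm : 0 ≤ m ∧ m ≤ (N : Int) + 1)
    (hrel : PilesRel N stA.1 stB.1 stB.2.1) (hans : stA.2 = stB.2.2) :
    PilesRel N (stepA N stA m).1 (stepB N stB m).1 (stepB N stB m).2.1 ∧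
      (stepA N stA m).2 = (stepB N stB m).2.2 := by
  obtain ⟨hlA, hc, hN, hch⟩ := hrel
  by_cases hvm : 1 ≤ m ∧ m ≤ (N : Int)
  · -- a valid move: B rescans column (m-1), A pops its slot
    have hcN : (m - 1).toNat < N := by omega
    set c : Nat := (m - 1).toNat with hcdef
    have hcast : (c : Int) = m - 1 := by omega
    have hidx : pyIdx (N + 1) (m - 1) = some c := by
      unfold pyIdx; rw [if_pos (by omega)]
    unfold stepA stepB
    rw [if_neg (by omega), hidx, ← hcast]
    cases hcol : colvals stB.1 c with
    | nil =>
      rw [pickB_none c stB.1 hcol]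
      have hA : stA.1.getD c [] = [] := by rw [hc c hcN, hcol]; rfl
      simp only [hA, List.length_nil, gt_iff_lt, Nat.lt_irrefl, if_neg, not_false_iff]
      exact ⟨⟨hlA, hc, hN, hch⟩, hans⟩
    | cons v rest =>
      obtain ⟨g', hpk, hg'c, hg'c'⟩ := pickB_some c stB.1 v rest hcol
      rw [hpk]
      have hA : stA.1.getD c [] = rest.reverse ++ [v] := by rw [hc c hcN, hcol]; simp
      simp only [hA]
      rw [if_pos (by simp)]
      simp only [List.getLastD_concat, List.dropLast_concat]
      have hcneN : c ≠ N := by omega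
      have hbA : (stA.1.set c rest.reverse).getD N [] = stB.2.1 := by
        rw [getD_set_ne _ _ _ _ hcneN]; exact hN
      rw [hbA]
      have hrelNew : ∀ b' : List Int, List.IsChain (· ≠ ·) b' →
          PilesRel N ((stA.1.set c rest.reverse).set N b') g' b' := by
        intro b' hch'
        refine ⟨by simp [hlA], ?_, ?_, hch'⟩
        · intro c' hc'
          have hc'N : c' ≠ N := by omega
          rw [getD_set_ne _ _ _ _ (Ne.symm hc'N)]
          by_cases hcc : c' = c
          · subst hcc
            rw [getD_set_self _ _ _ (by omega), hg'c]
          · rw [getD_set_ne _ _ _ _ (fun he => hcc he.symm), hc c' hc', hg'c' c' hcc]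
        · rw [getD_set_self _ _ _ (by simp [hlA])]
      by_cases hb : stB.2.1 ≠ [] ∧ stB.2.1.getLastD 0 = v
      · rw [if_pos ⟨List.length_pos_iff.mpr hb.1, hb.2⟩, if_pos hb]
        refine ⟨hrelNew _ (List.IsChain.dropLast hch), ?_⟩
        show stA.2 + 2 = stB.2.2 + 2
        omega
      · rw [if_neg (by
          intro hh
          exact hb ⟨List.length_pos_iff.mp hh.1, hh.2⟩), if_neg hb]
        refine ⟨hrelNew _ ?_, hans⟩
        rcases List.eq_nil_or_concat stB.2.1 with hbe | ⟨ys, a, hbe⟩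
        · rw [hbe]; simp
        · apply List.isChain_append.mpr
          refine ⟨hch, List.isChain_singleton v, ?_⟩
          intro x hx y hy
          have hxv : x = stB.2.1.getLastD 0 := by
            rw [List.getLastD_eq_getLast?, show stB.2.1.getLast? = some x from hx]
            rfl
          have hne' : stB.2.1 ≠ [] := by rw [hbe]; simp
          have : stB.2.1.getLastD 0 ≠ v := fun h' => hb ⟨hne', h'⟩
          cases hy
          rw [hxv]
          exact this
  · -- a no-column move (m = 0 or m = N+1): B skips it, and A's pop-then-push on
    -- its basket slot is a no-op since the basket never has two adjacent equals
    have hguard : m < 1 ∨ (N : Int) < m := by omega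
    have hidx : pyIdx (N + 1) (m - 1) = some N := by
      unfold pyIdx
      rcases (by omega : m = 0 ∨ m = (N : Int) + 1) with h | h <;> subst h
      · rw [if_neg (by omega), if_pos (by omega)]; congr 1; omega
      · rw [if_pos (by omega)]; congr 1; omega
    unfold stepA stepB
    rw [if_pos hguard, hidx]
    by_cases hbne : stB.2.1 = []
    · have hA : stA.1.getD N [] = [] := hN.trans hbne
      simp only [hA, List.length_nil, gt_iff_lt, Nat.lt_irrefl, if_neg, not_false_iff]
      exact ⟨⟨hlA, hc, hN, hch⟩, hans⟩
    · have hNlt : N < stA.1.length := by omega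
      have hlen0 : stB.2.1.length > 0 := List.length_pos_iff.mpr hbne
      have hb1 : (stA.1.set N (stB.2.1.dropLast)).getD N [] = stB.2.1.dropLast :=
        getD_set_self _ _ _ hNlt
      have hcond : ¬ (stB.2.1.dropLast.length > 0 ∧
          stB.2.1.dropLast.getLastD 0 = stB.2.1.getLastD 0) := by
        rintro ⟨h1, h2⟩
        exact chain_last _ hch (List.length_pos_iff.mp h1) h2
      have hrestore : (stA.1.set N (stB.2.1.dropLast)).set N
          (stB.2.1.dropLast ++ [stB.2.1.getLastD 0]) = stA.1 := by
        rw [List.set_set, dropLast_append_getLastD _ hbne, ← hN, set_getD_self _ _ hNlt]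
      simp only [hN]
      rw [if_pos hlen0, hb1, if_neg hcond, hrestore]
      exact ⟨⟨hlA, hc, hN, hch⟩, hans⟩

theorem loop_rel (N : Nat) (moves : List Int)
    (hmv : ∀ m ∈ moves, 0 ≤ m ∧ m ≤ (N : Int) + 1) :
    ∀ (stA : List (List Int) × Int) (stB : List (List Int) × List Int × Int),
      PilesRel N stA.1 stB.1 stB.2.1 → stA.2 = stB.2.2 →
      (moves.foldl (stepA N) stA).2 = (moves.foldl (stepB N) stB).2.2 := by
  induction moves with
  | nil => intro stA stB _ hans; exact hans
  | cons m ms ih =>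
    intro stA stB hrel hans
    have hs := step_rel N stA stB m (hmv m (by simp)) hrel hans
    exact ih (fun x hx => hmv x (by simp [hx])) _ _ hs.1 hs.2

-- ===== VERDICT =====
theorem solution_spec : Claim_equal_solution := by
  unfold Claim_equal_solution
  intro board moves _ hpre
  obtain ⟨hne, hdrop, hcolN, hmv⟩ := hpre
  unfold Spec_solution solution solution_alt
  set N := (PySem.List.pyGetD board 0 []).length with hNdef
  rw [PySem.List.slice?_none_none_neg_one, Option.getD_some]
  rw [if_neg (by
    simp only [List.any_eq_true, not_exists]
    rintro m ⟨hmem, hbad⟩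
    have := hmv m hmem
    simp only [decide_eq_true_eq] at hbad
    omega)]
  rw [List.map_id']
  by_cases hemp : moves = []
  · subst hemp; rfl
  · apply loop_rel N moves hmv
    · have hrowZ : ∀ row ∈ board, ∀ j : Nat, N + 1 ≤ j → row.getD j 0 = 0 := by
        intro row hr j hj
        rcases Nat.lt_or_ge j row.length with hlt | hge
        · have hmem : row[j] ∈ row.drop (N + 1) := by
            have hgd : (row.drop (N + 1))[j - (N + 1)]? = some row[j] := by
              rw [List.getElem?_drop]
              rw [show N + 1 + (j - (N + 1)) = j by omega]
              exact List.getElem?_eq_getElem hlt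
            exact List.mem_of_getElem? hgd
          rw [List.getD_eq_getElem row 0 hlt]
          exact hdrop row hr _ hmem
        · exact List.getD_eq_default _ _ hge
      have hbuild := build_getD board.reverse
        ((PySem.List.pyRange 0 ((N : Int) + 1) 1).map (fun _ => [])) ?hh
      case hh =>
        intro row hr j hj
        rw [length_init]
        by_contra hcon
        exact hj (hrowZ row (List.mem_reverse.mp hr) j (by omega))
      refine ⟨by rw [length_foldl_addRow, length_init], ?_, ?_, ?_⟩
      · intro c hcN
        rw [hbuild c, getD_init, List.nil_append, List.filterMap_reverse]
        rfl
      · rw [hbuild N, getD_init, List.nil_append]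
        have : board.reverse.filterMap (fun row => if row.getD N 0 ≠ 0 then some (row.getD N 0) else none) = [] := by
          rw [List.filterMap_eq_nil_iff]
          intro row hr
          have h0 := hcolN hemp row (List.mem_reverse.mp hr)
          have : (if row.getD N 0 ≠ 0 then some (row.getD N 0) else none) = none := by
            rw [h0]; simp
          exact this
        rw [this]
      · exact List.isChain_nil
    · rfl
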